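-- pv_equiv track=rewrite | github.com/ksharma120497/csci-603-computational-problem-solving | practice.py | numberOfTriplets
-- ===== SOURCE A (Python) =====
-- def numberOfTriplets(input1, input2, input3, input4, input5, input6):
--     ans=0
--     third=[]
--     for i in range(0,input2):
--         for j in range(0,input4):
--             third.append(input1[i]^input3[j])
--     for i in range(0,input6):
--         for j in range(0,len(third)):
--             if (bin(input5[i] ^ third[j]).count('1')) % 2 == 0:
--                 ans+=1
--     return ans
-- ===== SOURCE B (Python) =====
-- def numberOfTriplets(input1, input2, input3, input4, input5, input6):
--     # Aggregate by distinct value: count multiplicities of each XOR value and of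
--     # each query, then combine per distinct pair weighted by the product of counts.
--     # A count is a number of elements, so negative counts are clamped to 0 (as range() does).
--     xor_counts = {}
--     for x in input1[:max(input2, 0)]:
--         for y in input3[:max(input4, 0)]:
--             v = x ^ y
--             xor_counts[v] = xor_counts.get(v, 0) + 1
--     query_counts = {}
--     for a in input5[:max(input6, 0)]:
--         query_counts[a] = query_counts.get(a, 0) + 1
--     total = 0
--     for a, ca in query_counts.items():
--         for v, c in xor_counts.items():
--             if bin(a ^ v).count('1') % 2 == 0:
--                 total += ca * c
--     return total
-- ===== Notes on version B (the rewrite author's own statement) =====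
-- stated objective: alternative
-- what changed: B never materialises A's n2*n4 'third' list: it builds a counting dict of distinct XOR values and a counting dict of distinct queries, then adds count-products per distinct (query, value) pair, so the matching phase scales with the numbers of distinct values instead of the full multisets.
import Mathlib
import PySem

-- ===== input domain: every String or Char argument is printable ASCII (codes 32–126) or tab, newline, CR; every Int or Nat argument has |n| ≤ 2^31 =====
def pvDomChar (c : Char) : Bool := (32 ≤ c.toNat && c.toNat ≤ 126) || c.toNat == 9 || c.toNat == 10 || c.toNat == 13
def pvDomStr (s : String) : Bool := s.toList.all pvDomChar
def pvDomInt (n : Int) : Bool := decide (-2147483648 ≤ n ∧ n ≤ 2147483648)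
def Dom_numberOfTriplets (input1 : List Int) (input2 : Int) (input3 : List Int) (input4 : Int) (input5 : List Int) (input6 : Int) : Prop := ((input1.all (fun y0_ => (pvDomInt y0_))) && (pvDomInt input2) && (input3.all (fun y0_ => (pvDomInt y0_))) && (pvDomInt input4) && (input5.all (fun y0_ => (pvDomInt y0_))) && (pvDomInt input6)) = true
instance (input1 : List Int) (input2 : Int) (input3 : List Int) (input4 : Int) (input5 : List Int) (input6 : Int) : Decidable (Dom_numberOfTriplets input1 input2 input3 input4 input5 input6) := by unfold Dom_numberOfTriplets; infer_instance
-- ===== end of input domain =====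

-- ===== PORT A =====
def numberOfTriplets (input1 : List Int) (input2 : Int) (input3 : List Int) (input4 : Int) (input5 : List Int) (input6 : Int) : Int :=
  let third : List Int :=
    (PySem.List.pyRange 0 input2).foldl (fun acc i =>
      (PySem.List.pyRange 0 input4).foldl (fun acc2 j =>
        acc2 ++ [PySem.Int.bxor (PySem.List.pyGetD input1 i 0) (PySem.List.pyGetD input3 j 0)]) acc) []
  (PySem.List.pyRange 0 input6).foldl (fun ans i =>
    (PySem.List.pyRange 0 (PySem.List.len third)).foldl (fun ans2 j =>
      if PySem.Int.bitCount (PySem.Int.bxor (PySem.List.pyGetD input5 i 0) (PySem.List.pyGetD third j 0)) % 2 == 0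
      then ans2 + 1 else ans2) ans) 0

-- ===== PORT B =====
def numberOfTriplets_alt (input1 : List Int) (input2 : Int) (input3 : List Int) (input4 : Int) (input5 : List Int) (input6 : Int) : Int :=
  let xorCounts : PySem.Dict Int Int :=
    (PySem.List.slice input1 none (some (max input2 0))).foldl (fun d x =>
      (PySem.List.slice input3 none (some (max input4 0))).foldl (fun d2 y =>
        d2.insert (PySem.Int.bxor x y) (d2.getD (PySem.Int.bxor x y) 0 + 1)) d) PySem.Dict.empty
  let queryCounts : PySem.Dict Int Int :=
    (PySem.List.slice input5 none (some (max input6 0))).foldl (fun d a =>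
      d.insert a (d.getD a 0 + 1)) PySem.Dict.empty
  queryCounts.items.foldl (fun tot p =>
    xorCounts.items.foldl (fun tot2 q =>
      if PySem.Int.bitCount (PySem.Int.bxor p.1 q.1) % 2 == 0
      then tot2 + p.2 * q.2 else tot2) tot) 0

-- ===== PRECONDITION & SPEC =====
-- Pre_ admits exactly the inputs on which A returns (no IndexError): whenever both pair loops
-- actually run, input2/input4 must fit their lists, and if the query loop also runs, input6 must fit input5.
def Pre_numberOfTriplets (input1 : List Int) (input2 : Int) (input3 : List Int) (input4 : Int) (input5 : List Int) (input6 : Int) : Prop :=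
  0 < input2 → 0 < input4 →
    input2 ≤ (input1.length : Int) ∧ input4 ≤ (input3.length : Int) ∧
    (0 < input6 → input6 ≤ (input5.length : Int))
instance (input1 : List Int) (input2 : Int) (input3 : List Int) (input4 : Int) (input5 : List Int) (input6 : Int) : Decidable (Pre_numberOfTriplets input1 input2 input3 input4 input5 input6) := by unfold Pre_numberOfTriplets; infer_instance
def pvWitness_numberOfTriplets : List Int × Int × List Int × Int × List Int × Int := ([0, 3], 2, [1], 1, [2, -2], 2)
def Spec_numberOfTriplets (input1 : List Int) (input2 : Int) (input3 : List Int) (input4 : Int) (input5 : List Int) (input6 : Int) (out : Int) : Prop := out = numberOfTriplets_alt input1 input2 input3 input4 input5 input6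
instance (input1 : List Int) (input2 : Int) (input3 : List Int) (input4 : Int) (input5 : List Int) (input6 : Int) (out : Int) : Decidable (Spec_numberOfTriplets input1 input2 input3 input4 input5 input6 out) := by unfold Spec_numberOfTriplets; infer_instance

-- ===== CLAIM (what is proved, stated in full; the proofs are below) =====
def Claim_equal_numberOfTriplets : Prop := ∀ (input1 : List Int) (input2 : Int) (input3 : List Int) (input4 : Int) (input5 : List Int) (input6 : Int), Dom_numberOfTriplets input1 input2 input3 input4 input5 input6 → Pre_numberOfTriplets input1 input2 input3 input4 input5 input6 → Spec_numberOfTriplets input1 input2 input3 input4 input5 input6 (numberOfTriplets input1 input2 input3 input4 input5 input6)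

-- ===== LEMMAS AND PROOFS =====

-- a fold over range(0, n) reading xs[j] is a fold over the prefix xs[:n]
theorem foldl_pyRange_take {α β : Type} (xs : List α) (d : α) (f : β → α → β) (init : β)
    (n : Nat) (hn : n ≤ xs.length) :
    (PySem.List.pyRange 0 (n : Int)).foldl (fun acc j => f acc (PySem.List.pyGetD xs j d)) init
      = (xs.take n).foldl f init := by
  have hlen : PySem.List.len (xs.take n) = (n : Int) := by
    simp [PySem.List.len, Nat.min_eq_left hn]
  have h := PySem.List.foldl_pyRange_pyGetD (xs.take n) d f init (a := 0) (le_refl 0)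
  rw [hlen] at h
  simp only [Int.toNat_zero, List.drop_zero] at h
  rw [← h]
  apply PySem.List.foldl_congr_mem
  intro acc j hj
  have hj' := PySem.List.mem_pyRange_one.mp hj
  congr 1
  rw [PySem.List.pyGetD_of_nonneg _ _ hj'.1, PySem.List.pyGetD_of_nonneg _ _ hj'.1]
  have hjn : j.toNat < n := by omega
  rw [List.getD_eq_getElem?_getD, List.getD_eq_getElem?_getD, List.getElem?_take_of_lt hjn]

theorem sum_map_indicator_nodup (S : List Int) (f : Int → Int) (t : Int)
    (hnd : S.Nodup) (ht : t ∈ S) :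
    (S.map (fun v => (if v = t then (1 : Int) else 0) * f v)).sum = f t := by
  induction S with
  | nil => simp at ht
  | cons a l ihl =>
    rcases List.mem_cons.mp ht with h | h
    · subst h
      have hnot : t ∉ l := (List.nodup_cons.mp hnd).1
      simp only [List.map_cons, List.sum_cons]
      have hz : (l.map (fun v => (if v = t then (1 : Int) else 0) * f v)).sum = 0 := by
        rw [List.sum_eq_zero]
        intro x hx
        obtain ⟨v, hv, rfl⟩ := List.mem_map.mp hx
        have : v ≠ t := fun e => hnot (e ▸ hv)
        simp [this]
      rw [hz, add_zero]; simp
    · have hns : a ≠ t := by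
        rintro rfl; exact (List.nodup_cons.mp hnd).1 h
      simp only [List.map_cons, List.sum_cons, if_neg hns, zero_mul, zero_add]
      exact ihl (List.nodup_cons.mp hnd).2 h

-- summing count·f over a duplicate-free superlist of T's values is summing f over T
theorem sum_count_mul (T : List Int) (f : Int → Int) (S : List Int)
    (hnd : S.Nodup) (hsub : ∀ v ∈ T, v ∈ S) :
    (S.map (fun v => (T.count v : Int) * f v)).sum = (T.map f).sum := by
  induction T with
  | nil => simp
  | cons t l ihl =>
    have hsplit : ∀ v : Int, ((t :: l).count v : Int) = (l.count v : Int) + (if v = t then 1 else 0) := by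
      intro v
      rw [List.count_cons]
      by_cases h : v = t
      · subst h; simp
      · have h' : ¬ t = v := fun e => h e.symm
        simp [h, h']
    have hm : (S.map (fun v => ((t :: l).count v : Int) * f v)).sum
        = (S.map (fun v => (l.count v : Int) * f v + (if v = t then (1:Int) else 0) * f v)).sum := by
      congr 1
      apply List.map_congr_left
      intro v _
      rw [hsplit v, add_mul]
    rw [hm, PySem.List.sum_map_add_int]
    rw [ihl (fun v hv => hsub v (List.mem_cons_of_mem _ hv)),
        sum_map_indicator_nodup S f t hnd (hsub t List.mem_cons_self)]
    simp [add_comm]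

theorem numberOfTriplets_eq_sum_main (input1 : List Int) (input2 : Int) (input3 : List Int) (input4 : Int) (input5 : List Int) (input6 : Int)
    (h2 : 0 ≤ input2) (h2l : input2 ≤ (input1.length : Int)) (h4 : 0 ≤ input4)
    (h4l : input4 ≤ (input3.length : Int)) (h6 : 0 ≤ input6) (h6l : input6 ≤ (input5.length : Int)) :
    numberOfTriplets input1 input2 input3 input4 input5 input6 =
      (((input5.take input6.toNat).map (fun a =>
        ((((input1.take input2.toNat).flatMap (fun x => (input3.take input4.toNat).map (fun y => PySem.Int.bxor x y))).countP
          (fun t => PySem.Int.bitCount (PySem.Int.bxor a t) % 2 == 0) : Nat) : Int)))).sum := by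
  unfold numberOfTriplets
  rw [← Int.toNat_of_nonneg h2, ← Int.toNat_of_nonneg h4, ← Int.toNat_of_nonneg h6]
  have e3 : ∀ (x : Int) (acc : List Int),
      (PySem.List.pyRange 0 (input4.toNat : Int)).foldl (fun acc2 j =>
        acc2 ++ [PySem.Int.bxor x (PySem.List.pyGetD input3 j 0)]) acc
      = acc ++ (input3.take input4.toNat).map (fun y => PySem.Int.bxor x y) := by
    intro x acc
    rw [foldl_pyRange_take input3 0 (fun acc2 y => acc2 ++ [PySem.Int.bxor x y]) acc input4.toNat (by omega)]
    exact PySem.List.foldl_append_singleton_eq_map _ _ _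
  simp only [e3]
  rw [foldl_pyRange_take input1 0
        (fun acc x => acc ++ (input3.take input4.toNat).map (fun y => PySem.Int.bxor x y)) []
        input2.toNat (by omega)]
  rw [PySem.List.foldl_append_eq_flatMap
        (fun x => (input3.take input4.toNat).map (fun y => PySem.Int.bxor x y))]
  simp only [List.nil_append]
  set T := (input1.take input2.toNat).flatMap
      (fun x => (input3.take input4.toNat).map (fun y => PySem.Int.bxor x y)) with hT
  have e5 : ∀ (a ans : Int),
      (PySem.List.pyRange 0 (PySem.List.len T)).foldl (fun ans2 j =>
        if PySem.Int.bitCount (PySem.Int.bxor a (PySem.List.pyGetD T j 0)) % 2 == 0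
        then ans2 + 1 else ans2) ans
      = ans + ((T.countP (fun t => PySem.Int.bitCount (PySem.Int.bxor a t) % 2 == 0) : Nat) : Int) := by
    intro a ans
    have hlen : PySem.List.len T = ((T.length : Nat) : Int) := by simp [PySem.List.len]
    rw [hlen, foldl_pyRange_take T 0
        (fun ans2 t => if PySem.Int.bitCount (PySem.Int.bxor a t) % 2 == 0 then ans2 + 1 else ans2) ans
        T.length (le_refl _), List.take_length]
    exact PySem.List.foldl_if_add_one _ _ _
  refine Eq.trans (PySem.List.foldl_congr_mem _ _ _ _ (fun acc x _ => e5 (PySem.List.pyGetD input5 x 0) acc)) ?_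
  rw [foldl_pyRange_take input5 0
        (fun ans a => ans + ((T.countP (fun t => PySem.Int.bitCount (PySem.Int.bxor a t) % 2 == 0) : Nat) : Int)) 0
        input6.toNat (by omega)]
  rw [PySem.List.foldl_add (input5.take input6.toNat)
        (fun a => ((T.countP (fun t => PySem.Int.bitCount (PySem.Int.bxor a t) % 2 == 0) : Nat) : Int)) 0]
  rw [zero_add]
  simp only [hT, Int.toNat_natCast]

theorem numberOfTriplets_alt_eq_sum (input1 : List Int) (input2 : Int) (input3 : List Int) (input4 : Int) (input5 : List Int) (input6 : Int) :
    numberOfTriplets_alt input1 input2 input3 input4 input5 input6 =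
      (((input5.take input6.toNat).map (fun a =>
        ((((input1.take input2.toNat).flatMap (fun x => (input3.take input4.toNat).map (fun y => PySem.Int.bxor x y))).countP
          (fun t => PySem.Int.bitCount (PySem.Int.bxor a t) % 2 == 0) : Nat) : Int)))).sum := by
  unfold numberOfTriplets_alt
  rw [PySem.List.slice_to input1 (le_max_right input2 0),
      PySem.List.slice_to input3 (le_max_right input4 0),
      PySem.List.slice_to input5 (le_max_right input6 0)]
  rw [show (max input2 0).toNat = input2.toNat from by omega,
      show (max input4 0).toNat = input4.toNat from by omega,
      show (max input6 0).toNat = input6.toNat from by omega]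
  set L1 := input1.take input2.toNat with hL1
  set L3 := input3.take input4.toNat with hL3
  set L5 := input5.take input6.toNat with hL5
  set T := L1.flatMap (fun x => L3.map (fun y => PySem.Int.bxor x y)) with hTd
  have hxc : L1.foldl (fun d x =>
      L3.foldl (fun d2 y =>
        d2.insert (PySem.Int.bxor x y) (d2.getD (PySem.Int.bxor x y) 0 + 1)) d) PySem.Dict.empty
      = PySem.Dict.counter T := by
    have hstep : ∀ (x : Int) (d : PySem.Dict Int Int),
        L3.foldl (fun d2 y =>
          d2.insert (PySem.Int.bxor x y) (d2.getD (PySem.Int.bxor x y) 0 + 1)) d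
        = (L3.map (fun y => PySem.Int.bxor x y)).foldl
            (fun d2 v => d2.insert v (d2.getD v 0 + 1)) d := by
      intro x d
      rw [List.foldl_map]
    simp only [hstep]
    rw [← List.foldl_map (f := fun x => L3.map (fun y => PySem.Int.bxor x y))
          (g := fun (d : PySem.Dict Int Int) l =>
            l.foldl (fun d2 v => d2.insert v (d2.getD v 0 + 1)) d)]
    rw [← List.foldl_flatten, ← List.flatMap_def]
    exact PySem.Dict.foldl_insert_getD_add_one_eq_counter T
  rw [hxc, PySem.Dict.foldl_insert_getD_add_one_eq_counter L5]
  dsimp only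
  rw [PySem.Dict.items_counter L5, PySem.Dict.items_counter T]
  rw [List.foldl_map]
  dsimp only
  have einner : ∀ (a tot : Int),
      ((PySem.Set.ofList T).map (fun k => (k, (List.count k T : Int)))).foldl
        (fun tot2 q =>
          if PySem.Int.bitCount (PySem.Int.bxor a q.1) % 2 == 0
          then tot2 + (List.count a L5 : Int) * q.2 else tot2) tot
      = tot + (List.count a L5 : Int) *
          ((T.countP (fun t => PySem.Int.bitCount (PySem.Int.bxor a t) % 2 == 0) : Nat) : Int) := by
    intro a tot
    rw [List.foldl_map]
    dsimp only
    have hsplit : ∀ (tot2 k : Int),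
        (if PySem.Int.bitCount (PySem.Int.bxor a k) % 2 == 0
         then tot2 + (List.count a L5 : Int) * (List.count k T : Int) else tot2)
        = tot2 + (List.count a L5 : Int) *
            ((List.count k T : Int) * (if PySem.Int.bitCount (PySem.Int.bxor a k) % 2 == 0 then (1:Int) else 0)) := by
      intro tot2 k
      split <;> ring
    simp only [hsplit]
    rw [PySem.List.foldl_add (PySem.Set.ofList T)
        (fun k => (List.count a L5 : Int) *
          ((List.count k T : Int) * (if PySem.Int.bitCount (PySem.Int.bxor a k) % 2 == 0 then (1:Int) else 0)))]
    rw [PySem.List.sum_map_const_mul_int]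
    rw [sum_count_mul T (fun k => if PySem.Int.bitCount (PySem.Int.bxor a k) % 2 == 0 then (1:Int) else 0)
        (PySem.Set.ofList T) (PySem.Set.nodup_ofList T) (fun v hv => (PySem.Set.mem_ofList T v).mpr hv)]
    rw [show (fun k => if PySem.Int.bitCount (PySem.Int.bxor a k) % 2 == 0 then (1:Int) else 0)
        = (fun k => if (fun t => PySem.Int.bitCount (PySem.Int.bxor a t) % 2 == 0) k = true then (1:Int) else 0) from rfl]
    rw [PySem.List.sum_map_ite_one_zero (fun t => PySem.Int.bitCount (PySem.Int.bxor a t) % 2 == 0) T]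
  simp only [einner]
  rw [PySem.List.foldl_add (PySem.Set.ofList L5)
      (fun a => (List.count a L5 : Int) *
        ((T.countP (fun t => PySem.Int.bitCount (PySem.Int.bxor a t) % 2 == 0) : Nat) : Int)) 0]
  rw [zero_add]
  exact sum_count_mul L5 _ (PySem.Set.ofList L5) (PySem.Set.nodup_ofList L5)
      (fun v hv => (PySem.Set.mem_ofList L5 v).mpr hv)

theorem numberOfTriplets_eq_sum (input1 : List Int) (input2 : Int) (input3 : List Int) (input4 : Int) (input5 : List Int) (input6 : Int)
    (h : Pre_numberOfTriplets input1 input2 input3 input4 input5 input6) :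
    numberOfTriplets input1 input2 input3 input4 input5 input6 =
      (((input5.take input6.toNat).map (fun a =>
        ((((input1.take input2.toNat).flatMap (fun x => (input3.take input4.toNat).map (fun y => PySem.Int.bxor x y))).countP
          (fun t => PySem.Int.bitCount (PySem.Int.bxor a t) % 2 == 0) : Nat) : Int)))).sum := by
  rcases le_or_gt input2 0 with hc2 | hc2
  · unfold numberOfTriplets
    rw [PySem.List.pyRange_one_eq_nil hc2]
    simp [PySem.List.len, PySem.List.pyRange_one_eq_nil (le_refl (0:Int)),
          Int.toNat_of_nonpos hc2]
  · rcases le_or_gt input4 0 with hc4 | hc4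
    · unfold numberOfTriplets
      rw [PySem.List.pyRange_one_eq_nil hc4]
      rw [show (List.flatMap (fun x => (input3.take input4.toNat).map (fun y => PySem.Int.bxor x y))
            (input1.take input2.toNat)) = [] from by simp [Int.toNat_of_nonpos hc4]]
      simp [PySem.List.len, PySem.List.pyRange_one_eq_nil (le_refl (0:Int))]
    · obtain ⟨h2l, h4l, h6i⟩ := h hc2 hc4
      rcases le_or_gt input6 0 with hc6 | hc6
      · unfold numberOfTriplets
        rw [PySem.List.pyRange_one_eq_nil hc6]
        simp [Int.toNat_of_nonpos hc6]
      · exact numberOfTriplets_eq_sum_main input1 input2 input3 input4 input5 input6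
          (le_of_lt hc2) h2l (le_of_lt hc4) h4l (le_of_lt hc6) (h6i hc6)

-- ===== VERDICT (by name: the statement is the Claim_ definition above) =====
theorem numberOfTriplets_spec : Claim_equal_numberOfTriplets := by
  intro i1 i2 i3 i4 i5 i6 _ hpre
  unfold Spec_numberOfTriplets
  rw [numberOfTriplets_eq_sum _ _ _ _ _ _ hpre, numberOfTriplets_alt_eq_sum]
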